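-- pv_equiv track=rewrite | github.com/abu-menang/titan-tools | common/utils/classify_utils.py | classify_tracks
-- ===== SOURCE A (Python) =====
-- from typing import Dict, List, Tuple
--
-- def classify_tracks(
--     rows: List[Dict[str, str]],
--     allowed_vid: List[str],
--     allowed_aud: List[str],
--     allowed_sub: List[str],
-- ) -> Tuple[List[Dict[str, str]], List[Dict[str, str]]]:
--     """
--     Split tracks per file into ok vs issues buckets based on presence/count and language rules.
--     """
--     issues: List[Dict[str, str]] = []
--     ok: List[Dict[str, str]] = []
--     by_file: Dict[str, List[Dict[str, str]]] = {}
--     for r in rows: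
--         key = (r.get("output_filename") or r.get("filename") or r.get("path") or "").strip()
--         by_file.setdefault(key, []).append(r)
--
--     def _lang_ok(lang: str, allowed: List[str]) -> bool:
--         if not allowed:
--             return True
--         l = (lang or "").lower()
--         return any(l.startswith(a) for a in allowed)
--
--     for key, items in by_file.items():
--         v = sum(1 for i in items if (i.get("type") or "").lower() == "video")
--         a = sum(1 for i in items if (i.get("type") or "").lower() == "audio")
--         s = sum(1 for i in items if (i.get("type") or "").lower() == "subtitles")
--         lang_issue = any(
--             (i.get("type") or "").lower() == "video" and not _lang_ok(i.get("lang", ""), allowed_vid)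
--             or (i.get("type") or "").lower() == "audio" and not _lang_ok(i.get("lang", ""), allowed_aud)
--             or (i.get("type") or "").lower() == "subtitles" and not _lang_ok(i.get("lang", ""), allowed_sub)
--             for i in items
--         )
--         # 0-count cases are handled upstream (broken_*). Here only >1 counts or language issues mark as issues.
--         has_issue = v > 1 or a > 1 or s == 0 or lang_issue
--         if has_issue:
--             issues.extend(items)
--         else:
--             ok.extend(items)
--     return ok, issues
-- ===== SOURCE B (Python) =====
-- from typing import Dict, List, Tuple
--
-- def _lang_ok(lang: str, allowed: List[str]) -> bool:
--     if not allowed: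
--         return True
--     l = (lang or "").lower()
--     return any(l.startswith(a) for a in allowed)
--
-- def classify_tracks(
--     rows: List[Dict[str, str]],
--     allowed_vid: List[str],
--     allowed_aud: List[str],
--     allowed_sub: List[str],
-- ) -> Tuple[List[Dict[str, str]], List[Dict[str, str]]]:
--     # Single streaming pass: group and accumulate per-file stats at the same
--     # time, so no second scan over each group's items is needed.
--     groups: Dict[str, list] = {}  # key -> [items, v, a, s, lang_issue]
--     for r in rows:
--         key = (r.get("output_filename") or r.get("filename") or r.get("path") or "").strip()
--         g = groups.get(key)
--         if g is None:
--             g = [[], 0, 0, 0, False]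
--             groups[key] = g
--         g[0].append(r)
--         t = (r.get("type") or "").lower()
--         if t == "video":
--             g[1] += 1
--             if not _lang_ok(r.get("lang", ""), allowed_vid):
--                 g[4] = True
--         elif t == "audio":
--             g[2] += 1
--             if not _lang_ok(r.get("lang", ""), allowed_aud):
--                 g[4] = True
--         elif t == "subtitles":
--             g[3] += 1
--             if not _lang_ok(r.get("lang", ""), allowed_sub):
--                 g[4] = True
--     ok: List[Dict[str, str]] = []
--     issues: List[Dict[str, str]] = []
--     for items, v, a, s, lang_issue in groups.values():
--         if v > 1 or a > 1 or s == 0 or lang_issue: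
--             issues.extend(items)
--         else:
--             ok.extend(items)
--     return ok, issues
-- ===== Notes on version B (the rewrite author's own statement) =====
-- stated objective: alternative
-- what changed: A groups rows per file and then rescans each group four times (three count comprehensions and an any() for language issues); B computes the counts and the language flag incrementally in the single grouping pass, so each row's type/lang is examined exactly once and the per-group rescans disappear.
import Mathlib
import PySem

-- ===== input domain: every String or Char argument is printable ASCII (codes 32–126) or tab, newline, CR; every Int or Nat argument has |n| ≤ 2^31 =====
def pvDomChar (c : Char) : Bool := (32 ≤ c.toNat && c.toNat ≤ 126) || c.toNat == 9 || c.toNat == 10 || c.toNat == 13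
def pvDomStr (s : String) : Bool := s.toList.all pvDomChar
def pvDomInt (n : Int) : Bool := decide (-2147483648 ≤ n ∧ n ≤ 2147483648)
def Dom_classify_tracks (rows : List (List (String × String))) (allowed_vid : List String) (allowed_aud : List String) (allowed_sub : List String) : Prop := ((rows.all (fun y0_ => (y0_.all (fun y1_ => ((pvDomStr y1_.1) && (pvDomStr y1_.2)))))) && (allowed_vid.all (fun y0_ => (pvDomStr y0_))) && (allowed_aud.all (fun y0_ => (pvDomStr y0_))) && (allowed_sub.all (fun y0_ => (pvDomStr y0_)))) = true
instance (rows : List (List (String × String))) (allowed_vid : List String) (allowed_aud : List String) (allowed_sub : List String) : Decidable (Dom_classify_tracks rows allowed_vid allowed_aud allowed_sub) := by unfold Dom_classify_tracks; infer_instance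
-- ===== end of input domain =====

-- B replaces A's four per-group comprehension scans by a single streaming pass that
-- accumulates each group's counts and language flag while grouping (objective: alternative).

-- ===== shared helpers (the same Python sub-expressions occur verbatim in A and B) =====

-- r.get(k) on a dict row (first match in the association list)
def pvRowGet (r : List (String × String)) (k : String) : Option String :=
  (PySem.Dict.mk r).get? k

-- Python's `x or y` for x an Optional[str]: falls through on None and on ""
def pvOrStr (o : Option String) (y : String) : String :=
  match o with
  | none => y
  | some s => if s = "" then y else s

-- (r.get("output_filename") or r.get("filename") or r.get("path") or "").strip()
def pvKeyOf (r : List (String × String)) : String :=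
  PySem.Str.strip (pvOrStr (pvRowGet r "output_filename")
    (pvOrStr (pvRowGet r "filename") (pvOrStr (pvRowGet r "path") "")))

-- (i.get("type") or "").lower()
def pvTypeOf (r : List (String × String)) : String :=
  PySem.Str.lower (pvOrStr (pvRowGet r "type") "")

-- i.get("lang", "")
def pvLangOf (r : List (String × String)) : String :=
  (pvRowGet r "lang").getD ""

-- _lang_ok(lang, allowed)  (lang is always a str here, so `lang or ""` = lang)
def pv_lang_ok (lang : String) (allowed : List String) : Bool :=
  if allowed.isEmpty then true
  else allowed.any (fun a1 => PySem.Str.startswith (PySem.Str.lower lang) a1)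

-- ===== PORT A =====

-- sum(1 for i in items if (i.get("type") or "").lower() == t)
def pvCountT (t : String) (items : List (List (String × String))) : Int :=
  ((items.countP (fun i => pvTypeOf i == t)) : Int)

-- the `any(...)` generator computing lang_issue (Python's and/or precedence kept)
def pvLangIssue (allowed_vid allowed_aud allowed_sub : List String)
    (items : List (List (String × String))) : Bool :=
  items.any (fun i =>
    (pvTypeOf i == "video" && !(pv_lang_ok (pvLangOf i) allowed_vid))
    || (pvTypeOf i == "audio" && !(pv_lang_ok (pvLangOf i) allowed_aud))
    || (pvTypeOf i == "subtitles" && !(pv_lang_ok (pvLangOf i) allowed_sub)))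

-- by_file.setdefault(key, []).append(r) = overwrite-in-place with the appended list
def classify_tracks (rows : List (List (String × String))) (allowed_vid : List String) (allowed_aud : List String) (allowed_sub : List String) : (List (List (String × String))) × (List (List (String × String))) :=
  let by_file : PySem.Dict String (List (List (String × String))) :=
    rows.foldl (fun d r =>
      let key := pvKeyOf r
      d.insert key (d.getD key [] ++ [r])) PySem.Dict.empty
  by_file.values.foldl (fun acc items =>
    let v := pvCountT "video" items
    let a := pvCountT "audio" items
    let s := pvCountT "subtitles" items
    let lang_issue := pvLangIssue allowed_vid allowed_aud allowed_sub items
    if v > 1 ∨ a > 1 ∨ s = 0 ∨ lang_issue = true then (acc.1, acc.2 ++ items)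
    else (acc.1 ++ items, acc.2)) ([], [])

-- ===== PORT B =====

-- group state: (items, v, a, s, lang_issue)
def classify_tracks_alt (rows : List (List (String × String))) (allowed_vid : List String) (allowed_aud : List String) (allowed_sub : List String) : (List (List (String × String))) × (List (List (String × String))) :=
  let groups : PySem.Dict String ((List (List (String × String))) × Int × Int × Int × Bool) :=
    rows.foldl (fun d r =>
      let key := pvKeyOf r
      let g := (d.get? key).getD ([], 0, 0, 0, false)
      let items := g.1 ++ [r]
      let t := pvTypeOf r
      let g' :=
        if t == "video" then
          (items, g.2.1 + 1, g.2.2.1, g.2.2.2.1, g.2.2.2.2 || !(pv_lang_ok (pvLangOf r) allowed_vid))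
        else if t == "audio" then
          (items, g.2.1, g.2.2.1 + 1, g.2.2.2.1, g.2.2.2.2 || !(pv_lang_ok (pvLangOf r) allowed_aud))
        else if t == "subtitles" then
          (items, g.2.1, g.2.2.1, g.2.2.2.1 + 1, g.2.2.2.2 || !(pv_lang_ok (pvLangOf r) allowed_sub))
        else
          (items, g.2.1, g.2.2.1, g.2.2.2.1, g.2.2.2.2)
      d.insert key g') PySem.Dict.empty
  groups.values.foldl (fun acc g =>
    if g.2.1 > 1 ∨ g.2.2.1 > 1 ∨ g.2.2.2.1 = 0 ∨ g.2.2.2.2 = true then (acc.1, acc.2 ++ g.1)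
    else (acc.1 ++ g.1, acc.2)) ([], [])

-- ===== PRECONDITION & SPEC =====
def Spec_classify_tracks (rows : List (List (String × String))) (allowed_vid : List String) (allowed_aud : List String) (allowed_sub : List String) (out : (List (List (String × String))) × (List (List (String × String)))) : Prop := out = classify_tracks_alt rows allowed_vid allowed_aud allowed_sub
instance (rows : List (List (String × String))) (allowed_vid : List String) (allowed_aud : List String) (allowed_sub : List String) (out : (List (List (String × String))) × (List (List (String × String)))) : Decidable (Spec_classify_tracks rows allowed_vid allowed_aud allowed_sub out) := by unfold Spec_classify_tracks; infer_instance

-- ===== CLAIM (what is proved, stated in full; the proofs are below) =====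
def Claim_equal_classify_tracks : Prop := ∀ (rows : List (List (String × String))) (allowed_vid : List String) (allowed_aud : List String) (allowed_sub : List String), Dom_classify_tracks rows allowed_vid allowed_aud allowed_sub → Spec_classify_tracks rows allowed_vid allowed_aud allowed_sub (classify_tracks rows allowed_vid allowed_aud allowed_sub)

-- ===== LEMMAS AND PROOFS =====

-- the stats record B maintains, expressed from a group's items via A's per-group functions
def pvEnrich (allowed_vid allowed_aud allowed_sub : List String)
    (items : List (List (String × String))) :
    (List (List (String × String))) × Int × Int × Int × Bool :=
  (items, pvCountT "video" items, pvCountT "audio" items, pvCountT "subtitles" items,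
    pvLangIssue allowed_vid allowed_aud allowed_sub items)

-- B's one-row update of a group's state equals recomputing the stats on items ++ [r]
lemma pvEnrich_step (av aa asb : List String) (items : List (List (String × String)))
    (r : List (String × String)) :
    (let g := pvEnrich av aa asb items
     let t := pvTypeOf r
     if t == "video" then
       (g.1 ++ [r], g.2.1 + 1, g.2.2.1, g.2.2.2.1, g.2.2.2.2 || !(pv_lang_ok (pvLangOf r) av))
     else if t == "audio" then
       (g.1 ++ [r], g.2.1, g.2.2.1 + 1, g.2.2.2.1, g.2.2.2.2 || !(pv_lang_ok (pvLangOf r) aa))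
     else if t == "subtitles" then
       (g.1 ++ [r], g.2.1, g.2.2.1, g.2.2.2.1 + 1, g.2.2.2.2 || !(pv_lang_ok (pvLangOf r) asb))
     else
       (g.1 ++ [r], g.2.1, g.2.2.1, g.2.2.2.1, g.2.2.2.2)) =
    pvEnrich av aa asb (items ++ [r]) := by
  simp only [pvEnrich, pvCountT, pvLangIssue, List.countP_append, List.any_append,
    List.countP_cons, List.countP_nil, List.any_cons, List.any_nil, Bool.or_false]
  by_cases hv : pvTypeOf r = "video"
  · simp [hv]
  · by_cases ha : pvTypeOf r = "audio"
    · simp [ha]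
    · by_cases hs : pvTypeOf r = "subtitles"
      · simp [hs]
      · simp [hv, ha, hs]

-- the item-list relation between A's by_file and B's groups dicts
def pvRel (av aa asb : List String)
    (dA : PySem.Dict String (List (List (String × String))))
    (dB : PySem.Dict String ((List (List (String × String))) × Int × Int × Int × Bool)) : Prop :=
  dB.items = dA.items.map (fun p => (p.1, pvEnrich av aa asb p.2))

lemma pvRel_get? (av aa asb : List String) {dA dB} (h : pvRel av aa asb dA dB) (k : String) :
    dB.get? k = (dA.get? k).map (pvEnrich av aa asb) := by
  simp only [PySem.Dict.get?, pvRel] at h ⊢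
  rw [h, List.find?_map]
  have hcomp : ((fun (p : String × ((List (List (String × String))) × Int × Int × Int × Bool)) => p.1 == k) ∘
      (fun (p : String × List (List (String × String))) => (p.1, pvEnrich av aa asb p.2))) =
      (fun (p : String × List (List (String × String))) => p.1 == k) := rfl
  rw [hcomp]
  cases List.find? (fun p => p.1 == k) dA.items with
  | none => rfl
  | some p => rfl

lemma pvRel_contains (av aa asb : List String) {dA dB} (h : pvRel av aa asb dA dB) (k : String) :
    dB.contains k = dA.contains k := by
  simp only [PySem.Dict.contains, pvRel] at h ⊢
  rw [h, List.any_map]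
  rfl

lemma pvRel_insert (av aa asb : List String) {dA dB} (h : pvRel av aa asb dA dB)
    (k : String) (v : List (List (String × String))) :
    pvRel av aa asb (dA.insert k v) (dB.insert k (pvEnrich av aa asb v)) := by
  simp only [PySem.Dict.insert, pvRel_contains av aa asb h k]
  by_cases hc : dA.contains k = true
  · simp only [hc, if_true, pvRel] at h ⊢
    rw [h, List.map_map, List.map_map]
    apply List.map_congr_left
    intro p _
    by_cases hk : (p.1 == k) = true <;> simp [Function.comp, hk]
  · simp only [hc, pvRel] at h ⊢
    simp [h]

lemma pvRel_fold (av aa asb : List String) (rows : List (List (String × String)))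
    {dA dB} (h : pvRel av aa asb dA dB) :
    pvRel av aa asb
      (rows.foldl (fun d r =>
        let key := pvKeyOf r
        d.insert key (d.getD key [] ++ [r])) dA)
      (rows.foldl (fun d r =>
        let key := pvKeyOf r
        let g := (d.get? key).getD ([], 0, 0, 0, false)
        let items := g.1 ++ [r]
        let t := pvTypeOf r
        let g' :=
          if t == "video" then
            (items, g.2.1 + 1, g.2.2.1, g.2.2.2.1, g.2.2.2.2 || !(pv_lang_ok (pvLangOf r) av))
          else if t == "audio" then
            (items, g.2.1, g.2.2.1 + 1, g.2.2.2.1, g.2.2.2.2 || !(pv_lang_ok (pvLangOf r) aa))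
          else if t == "subtitles" then
            (items, g.2.1, g.2.2.1, g.2.2.2.1 + 1, g.2.2.2.2 || !(pv_lang_ok (pvLangOf r) asb))
          else
            (items, g.2.1, g.2.2.1, g.2.2.2.1, g.2.2.2.2)
        d.insert key g') dB) := by
  induction rows generalizing dA dB with
  | nil => exact h
  | cons r rs ih =>
    apply ih
    have hg : (dB.get? (pvKeyOf r)).getD ([], 0, 0, 0, false)
        = pvEnrich av aa asb (dA.getD (pvKeyOf r) []) := by
      rw [pvRel_get? av aa asb h]
      cases hA : dA.get? (pvKeyOf r) <;> simp [PySem.Dict.getD, hA] <;> rfl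
    simp only [hg, pvEnrich_step av aa asb (dA.getD (pvKeyOf r) []) r]
    exact pvRel_insert av aa asb h (pvKeyOf r) (dA.getD (pvKeyOf r) [] ++ [r])

-- the two output folds agree on related dicts
lemma pvFinal (av aa asb : List String) {dA : PySem.Dict String (List (List (String × String)))}
    {dB : PySem.Dict String ((List (List (String × String))) × Int × Int × Int × Bool)}
    (h : pvRel av aa asb dA dB) :
    dA.values.foldl (fun acc items =>
      let v := pvCountT "video" items
      let a := pvCountT "audio" items
      let s := pvCountT "subtitles" items
      let lang_issue := pvLangIssue av aa asb items
      if v > 1 ∨ a > 1 ∨ s = 0 ∨ lang_issue = true then (acc.1, acc.2 ++ items)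
      else (acc.1 ++ items, acc.2)) ([], []) =
    dB.values.foldl (fun acc g =>
      if g.2.1 > 1 ∨ g.2.2.1 > 1 ∨ g.2.2.2.1 = 0 ∨ g.2.2.2.2 = true then (acc.1, acc.2 ++ g.1)
      else (acc.1 ++ g.1, acc.2)) ([], []) := by
  have hvals : dB.values = dA.values.map (pvEnrich av aa asb) := by
    simp only [PySem.Dict.values, pvRel] at h ⊢
    rw [h, List.map_map, List.map_map]
    rfl
  rw [hvals, List.foldl_map]
  rfl

-- ===== VERDICT (by name: the statement is the Claim_ definition above) =====
theorem classify_tracks_spec : Claim_equal_classify_tracks := by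
  intro rows av aa asb _
  show classify_tracks rows av aa asb = classify_tracks_alt rows av aa asb
  unfold classify_tracks classify_tracks_alt
  exact pvFinal av aa asb (pvRel_fold av aa asb rows
    (dA := PySem.Dict.empty) (dB := PySem.Dict.empty) rfl)
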